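-- pv_equiv track=rewrite | github.com/alpha-kwhn/Programmers | Level1/문자열 내림차순으로 배치하기.py | solution
-- ===== SOURCE A (Python) =====
-- def solution(s):
--     lis = list(s)
--     cik = []
--     con = []
--     for i in range(len(lis)):
--         if lis[i].isupper() == True:
--             con.append(lis[i])
--     for i in lis:
--         if i not in con:
--             cik.append(i)
--
--     con.sort(reverse=True)
--     cik.sort(reverse=True)
--     newer = cik + con
--     answer = ''.join(newer)
--     return answer
-- ===== SOURCE B (Python) =====
-- def solution(s):
--     return ''.join(sorted(s, key=lambda c: (not c.isupper(), c), reverse=True))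
-- ===== Notes on version B (the rewrite author's own statement) =====
-- stated objective: idiomatic
-- what changed: Replaced the partition-into-two-lists-and-sort-each scheme (including the quadratic 'i not in con' membership scan) with a single keyed sort: key (not c.isupper(), c) with reverse=True puts non-uppercase characters first and each group in descending order.
import Mathlib
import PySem

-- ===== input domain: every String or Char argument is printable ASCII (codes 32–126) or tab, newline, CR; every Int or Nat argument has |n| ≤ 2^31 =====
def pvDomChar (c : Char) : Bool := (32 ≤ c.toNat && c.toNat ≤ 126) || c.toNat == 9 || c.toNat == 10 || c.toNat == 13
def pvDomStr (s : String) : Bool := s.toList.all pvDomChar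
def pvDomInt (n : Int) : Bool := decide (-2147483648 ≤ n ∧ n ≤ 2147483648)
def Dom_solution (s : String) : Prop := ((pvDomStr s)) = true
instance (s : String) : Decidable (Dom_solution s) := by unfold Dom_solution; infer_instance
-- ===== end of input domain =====

-- B replaces A's partition-into-two-lists-and-sort-each scheme (with its quadratic
-- 'i not in con' scan) by one keyed sort — more idiomatic, same exact result.

-- ===== PORT A =====
def solution (s : String) : String :=
  let lis := s.toList
  -- for i in range(len(lis)): if lis[i].isupper() == True: con.append(lis[i])
  let con := (PySem.List.pyRange 0 (PySem.List.len lis)).foldl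
      (fun con i =>
        if PySem.Chars.isupper (PySem.List.pyGetD lis i ' ') = true then
          con ++ [PySem.List.pyGetD lis i ' ']
        else con) []
  -- for i in lis: if i not in con: cik.append(i)
  let cik := lis.foldl (fun cik c => if con.contains c = true then cik else cik ++ [c]) []
  let con := PySem.List.sorted con (fun x => x) true
  let cik := PySem.List.sorted cik (fun x => x) true
  let newer := cik ++ con
  String.ofList newer

-- ===== PORT B =====
-- ''.join(sorted(s, key=lambda c: (not c.isupper(), c), reverse=True))
def solution_alt (s : String) : String :=
  String.ofList (PySem.List.sorted2 s.toList (fun c => !(PySem.Chars.isupper c)) (fun c => c) true)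

-- ===== PRECONDITION & SPEC =====
def Spec_solution (s : String) (out : String) : Prop := out = solution_alt s
instance (s : String) (out : String) : Decidable (Spec_solution s out) := by unfold Spec_solution; infer_instance

-- ===== CLAIM (what is proved, stated in full; the proofs are below) =====
def Claim_equal_solution : Prop := ∀ (s : String), Dom_solution s → Spec_solution s (solution s)

-- ===== LEMMAS AND PROOFS =====

/-- An integer key whose order is the lexicographic order of `(not isupper c, c)`. -/
def pvKey (c : Char) : Int := (if PySem.Chars.isupper c then 0 else 1) * 1114112 + c.toNat

lemma pvCharBound (c : Char) : c.toNat < 1114112 := by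
  have h := c.valid
  rcases h with h | h
  · exact lt_trans h (by norm_num)
  · exact h.2

lemma pvKey_inj : Function.Injective pvKey := by
  intro a b hab
  have ha := pvCharBound a
  have hb := pvCharBound b
  have h : a.toNat = b.toNat := by
    unfold pvKey at hab
    by_cases h1 : PySem.Chars.isupper a <;> by_cases h2 : PySem.Chars.isupper b <;>
      simp [h1, h2] at hab <;> omega
  exact Char.ext (UInt32.toNat_inj.mp h)

lemma pvChar_le_iff (a b : Char) : a ≤ b ↔ a.toNat ≤ b.toNat := Iff.rfl

lemma pvChar_lt_iff (a b : Char) : a < b ↔ a.toNat < b.toNat := Iff.rfl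

/-- B's two-key reverse sort is the one-key reverse sort by `pvKey`. -/
lemma pvSorted2_eq (xs : List Char) :
    PySem.List.sorted2 xs (fun c => !(PySem.Chars.isupper c)) (fun c => c) true
      = PySem.List.sorted xs pvKey true := by
  have hbefore :
      (fun a b : Char => decide ((!(PySem.Chars.isupper b)) < (!(PySem.Chars.isupper a)))
          || (!decide ((!(PySem.Chars.isupper a)) < (!(PySem.Chars.isupper b))) && decide (b < a)))
      = (fun a b : Char => decide (pvKey b < pvKey a)) := by
    funext a b
    have ha := pvCharBound a
    have hb := pvCharBound b
    by_cases h1 : PySem.Chars.isupper a <;> by_cases h2 : PySem.Chars.isupper b <;>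
      simp [h1, h2, pvKey, pvChar_lt_iff, Bool.lt_iff] <;> omega
  unfold PySem.List.sorted2 PySem.List.sorted
  simp only [if_true, hbefore]

/-- Both loops of A produce the two filters. -/
lemma pvA_list (L : List Char) :
    solution (String.ofList L)
      = String.ofList (PySem.List.sorted (L.filter (fun c => !(PySem.Chars.isupper c))) (fun x => x) true
          ++ PySem.List.sorted (L.filter (fun c => PySem.Chars.isupper c)) (fun x => x) true) := by
  unfold solution
  simp only [String.toList_ofList]
  -- first loop: range/index loop is a filter
  have hcon :
      (PySem.List.pyRange 0 (PySem.List.len L)).foldl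
        (fun con i =>
          if PySem.Chars.isupper (PySem.List.pyGetD L i ' ') = true then
            con ++ [PySem.List.pyGetD L i ' ']
          else con) []
        = L.filter (fun c => PySem.Chars.isupper c) := by
    rw [PySem.List.foldl_pyRange_pyGetD L ' '
        (fun con c => if PySem.Chars.isupper c = true then con ++ [c] else con) [] (a := 0) le_rfl]
    simpa using PySem.List.foldl_append_if_eq_filter (fun c => PySem.Chars.isupper c) L []
  rw [hcon]
  -- second loop: membership scan is the complementary filter
  have hcik :
      L.foldl (fun cik c =>
          if (L.filter (fun c => PySem.Chars.isupper c)).contains c = true then cik else cik ++ [c]) []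
        = L.filter (fun c => !(PySem.Chars.isupper c)) := by
    rw [PySem.List.foldl_congr_mem L _
        (fun cik c => if (!((L.filter (fun c => PySem.Chars.isupper c)).contains c)) = true
                            then cik ++ [c] else cik) []
        (by intro acc x hx
            by_cases h : PySem.Chars.isupper x = true <;> simp [h, hx])]
    rw [PySem.List.foldl_append_if_eq_filter]
    simp only [List.nil_append]
    apply List.filter_congr
    intro c hc
    by_cases h : PySem.Chars.isupper c <;> simp [h, hc]
  rw [hcik]

/-- Reverse-sortedness by the id key on a constant-isupper list transfers to `pvKey`. -/
lemma pvPairwise_group (l : List Char) (b : Bool)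
    (hmem : ∀ c ∈ l, PySem.Chars.isupper c = b)
    (hpw : l.Pairwise (fun a c => (c : Char) ≤ a)) :
    l.Pairwise (fun a c => pvKey c ≤ pvKey a) := by
  refine List.Pairwise.imp_of_mem ?_ hpw
  intro a c hma hmc h
  have h1 := hmem a hma
  have h2 := hmem c hmc
  unfold pvKey
  rw [h1, h2]
  have := (pvChar_le_iff c a).mp h
  cases b <;> simp <;> omega

-- ===== VERDICT (by name: the statement is the Claim_ definition above) =====
theorem solution_spec : Claim_equal_solution := by
  intro s _
  unfold Spec_solution solution_alt
  rw [pvSorted2_eq]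
  obtain ⟨L, rfl⟩ : ∃ L, s = String.ofList L := ⟨s.toList, Eq.symm String.ofList_toList⟩
  rw [pvA_list]
  simp only [String.toList_ofList]
  congr 1
  -- both sides are permutations of L, reverse-sorted by the injective key pvKey
  set cikS := PySem.List.sorted (L.filter (fun c => !(PySem.Chars.isupper c))) (fun x => x) true with hcik
  set conS := PySem.List.sorted (L.filter (fun c => PySem.Chars.isupper c)) (fun x => x) true with hcon
  apply PySem.List.eq_of_perm_of_pairwise_le_of_injective (key := fun c => -pvKey c)
    (by intro a b h; exact pvKey_inj (by simpa using neg_injective h))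
  · -- permutation
    refine List.Perm.trans ?_ (PySem.List.sorted_perm L pvKey true).symm
    refine List.Perm.trans (List.Perm.append (PySem.List.sorted_perm _ _ _) (PySem.List.sorted_perm _ _ _)) ?_
    simpa using List.filter_append_perm (fun c => !(PySem.Chars.isupper c)) L
  · -- A's list is pairwise key-descending
    rw [List.pairwise_append]
    refine ⟨?_, ?_, ?_⟩
    · have := pvPairwise_group cikS false
        (by intro c hc
            rw [hcik] at hc
            have := (PySem.List.mem_sorted _ _ _ _).mp hc
            simpa using (List.mem_filter.mp this).2)
        (PySem.List.sorted_pairwise_rev _ _)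
      exact this.imp (by intro a c h; simpa using h)
    · have := pvPairwise_group conS true
        (by intro c hc
            rw [hcon] at hc
            have := (PySem.List.mem_sorted _ _ _ _).mp hc
            exact (List.mem_filter.mp this).2)
        (PySem.List.sorted_pairwise_rev _ _)
      exact this.imp (by intro a c h; simpa using h)
    · intro a ha b hb
      have hua : PySem.Chars.isupper a = false := by
        rw [hcik] at ha
        have := (PySem.List.mem_sorted _ _ _ _).mp ha
        simpa using (List.mem_filter.mp this).2
      have hub : PySem.Chars.isupper b = true := by
        rw [hcon] at hb
        have := (PySem.List.mem_sorted _ _ _ _).mp hb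
        exact (List.mem_filter.mp this).2
      have hbb := pvCharBound b
      simp only [neg_le_neg_iff]
      unfold pvKey
      rw [hua, hub]
      simp
      omega
  · -- B's list is pairwise key-descending
    exact (PySem.List.sorted_pairwise_rev L pvKey).imp (by intro a c h; simpa using h)
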